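-- pv_equiv track=rewrite | github.com/L00145232-LYIT/myWork | python/practical8/q3.py | sumWithoutSmallest
-- ===== SOURCE A (Python) =====
-- def sumWithoutSmallest(values):
--     smallest = values[0]
--     total = 0
--     for v in values:
--         if v < smallest:
--             smallest = v
--         total += v
--     return total - smallest
-- ===== SOURCE B (Python) =====
-- def sumWithoutSmallest(values):
--     return sum(sorted(values)[1:])
-- ===== Notes on version B (the rewrite author's own statement) =====
-- stated objective: alternative
-- what changed: Sorts the list and sums everything after the first (smallest) element, replacing A's single fused loop that tracks both a running total and the minimum; Pre_ excludes the empty list, on which A raises IndexError while B naturally returns 0.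
import Mathlib
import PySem

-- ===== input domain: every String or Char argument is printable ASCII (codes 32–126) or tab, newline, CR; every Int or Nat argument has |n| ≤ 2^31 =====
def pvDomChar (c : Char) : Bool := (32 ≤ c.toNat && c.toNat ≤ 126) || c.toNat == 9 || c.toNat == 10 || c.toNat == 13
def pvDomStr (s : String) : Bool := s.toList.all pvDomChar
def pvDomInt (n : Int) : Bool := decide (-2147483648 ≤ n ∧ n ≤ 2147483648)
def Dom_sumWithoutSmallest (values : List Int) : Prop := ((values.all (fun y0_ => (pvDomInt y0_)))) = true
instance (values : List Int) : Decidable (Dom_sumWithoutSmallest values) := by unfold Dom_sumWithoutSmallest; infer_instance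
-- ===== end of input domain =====

-- B sorts the list and sums everything after the first (smallest) element, instead of A's fused total+minimum loop.


-- ===== PORT A =====
def sumWithoutSmallest (values : List Int) : Int :=
  match PySem.List.pyGet? values 0 with
  | none => 0  -- unreachable under Pre_: Python raises IndexError here
  | some s0 =>
    let st := values.foldl (fun (st : Int × Int) v =>
      (if v < st.1 then v else st.1, st.2 + v)) (s0, 0)
    st.2 - st.1

-- ===== PORT B =====
def sumWithoutSmallest_alt (values : List Int) : Int :=
  (PySem.List.slice (PySem.List.sorted values (fun y => y)) (some 1) none).sum

-- ===== PRECONDITION & SPEC =====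
-- A raises IndexError on the empty list (it evaluates values[0]); B returns 0 there.
def Pre_sumWithoutSmallest (values : List Int) : Prop := values ≠ []
instance (values : List Int) : Decidable (Pre_sumWithoutSmallest values) := by unfold Pre_sumWithoutSmallest; infer_instance
def pvWitness_sumWithoutSmallest : List Int := [3, 1, 2]
def Spec_sumWithoutSmallest (values : List Int) (out : Int) : Prop := out = sumWithoutSmallest_alt values
instance (values : List Int) (out : Int) : Decidable (Spec_sumWithoutSmallest values out) := by unfold Spec_sumWithoutSmallest; infer_instance

-- ===== CLAIM =====
def Claim_equal_sumWithoutSmallest : Prop := ∀ (values : List Int), Dom_sumWithoutSmallest values → Pre_sumWithoutSmallest values → Spec_sumWithoutSmallest values (sumWithoutSmallest values)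

-- ===== LEMMAS AND PROOFS =====
theorem loop_eq_min_sum (t : List Int) : ∀ (s acc : Int),
    t.foldl (fun (st : Int × Int) v => (if v < st.1 then v else st.1, st.2 + v)) (s, acc)
      = (t.foldl min s, acc + t.sum) := by
  induction t with
  | nil => intro s acc; simp
  | cons h t ih =>
    intro s acc
    simp only [List.foldl_cons, List.sum_cons, ih]
    refine Prod.ext ?_ ?_
    · rcases lt_or_ge h s with hl | hl
      · simp [hl, min_eq_right (le_of_lt hl)]
      · simp [not_lt.mpr hl, min_eq_left hl]
    · simp; ring

theorem fmin_mem (t : List Int) : ∀ (x : Int), t.foldl min x ∈ x :: t := by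
  induction t with
  | nil => intro x; simp
  | cons h t ih =>
    intro x
    have hmem := ih (min x h)
    simp only [List.foldl_cons]
    rcases List.mem_cons.mp hmem with h1 | h1
    · rcases min_cases x h with ⟨he, _⟩ | ⟨he, _⟩ <;> rw [h1, he] <;> simp
    · simp [h1]

theorem fmin_le (t : List Int) : ∀ (x y : Int), y ∈ x :: t → t.foldl min x ≤ y := by
  induction t with
  | nil => intro x y hy; simp at hy; simp [hy]
  | cons h t ih =>
    intro x y hy
    simp only [List.foldl_cons]
    have hself : t.foldl min (min x h) ≤ min x h := ih (min x h) (min x h) List.mem_cons_self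
    rcases List.mem_cons.mp hy with h1 | h1
    · rw [h1]; exact le_trans hself (min_le_left _ _)
    · rcases List.mem_cons.mp h1 with h2 | h2
      · rw [h2]; exact le_trans hself (min_le_right _ _)
      · exact ih (min x h) y (List.mem_cons_of_mem _ h2)

-- ===== VERDICT =====
theorem sumWithoutSmallest_spec : Claim_equal_sumWithoutSmallest := by
  intro values _ hpre
  cases values with
  | nil => exact absurd rfl hpre
  | cons x t =>
    show sumWithoutSmallest (x :: t) = sumWithoutSmallest_alt (x :: t)
    have hsnil : PySem.List.sorted (x :: t) (fun y => y) ≠ [] := by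
      intro h
      exact (List.cons_ne_nil x t) ((PySem.List.sorted_eq_nil_iff (x :: t) (fun y => y) false).mp h)
    obtain ⟨m, ts, hs⟩ := List.exists_cons_of_ne_nil hsnil
    have hperm : (m :: ts).Perm (x :: t) := hs ▸ PySem.List.sorted_perm (x :: t) (fun y => y) false
    have hmle : ∀ y ∈ (x :: t), m ≤ y := by
      intro y hy
      exact PySem.List.key_head_sorted_le (x :: t) (fun y => y) hs y hy
    have hfm : t.foldl min x = m := by
      have h1 : t.foldl min x ≤ m := fmin_le t x m (hperm.mem_iff.mp (List.mem_cons_self ..))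
      have h2 : m ≤ t.foldl min x := hmle _ (fmin_mem t x)
      omega
    have hsum : m + ts.sum = x + t.sum := by
      have := hperm.sum_eq
      simpa using this
    simp only [sumWithoutSmallest, sumWithoutSmallest_alt, PySem.List.pyGet?, PySem.List.pyIdx?]
    rw [hs, PySem.List.slice_from_one]
    simp [loop_eq_min_sum, hfm]
    omega
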